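-- pv_equiv track=rewrite | github.com/krittindev/com-prog | grader/code/04/04_Loop_04/04_Loop_04.py | get_parentheses
-- ===== SOURCE A (Python) =====
-- def get_parentheses(text):
--     result = ''
--     for i in range(len(text)):
--         if text[i] == '(':
--             result += '['
--         elif text[i] == '[':
--             result += '('
--         elif text[i] == ']':
--             result += ')'
--         elif text[i] == ')':
--             result += ']'
--         else:
--             result += text[i]
--     return result
-- ===== SOURCE B (Python) =====
-- def get_parentheses(text):
--     # Staged whole-string passes: swap '(' <-> '[' via a sentinel, then ')' <-> ']'.
--     text = text.replace('(', '\x00').replace('[', '(').replace('\x00', '[')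
--     text = text.replace(')', '\x01').replace(']', ')').replace('\x01', ']')
--     return text
-- ===== Notes on version B (the rewrite author's own statement) =====
-- stated objective: faster
-- what changed: Replaces the per-character if/elif index loop with six staged whole-string str.replace passes that swap each bracket pair through a sentinel character.
import Mathlib
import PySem

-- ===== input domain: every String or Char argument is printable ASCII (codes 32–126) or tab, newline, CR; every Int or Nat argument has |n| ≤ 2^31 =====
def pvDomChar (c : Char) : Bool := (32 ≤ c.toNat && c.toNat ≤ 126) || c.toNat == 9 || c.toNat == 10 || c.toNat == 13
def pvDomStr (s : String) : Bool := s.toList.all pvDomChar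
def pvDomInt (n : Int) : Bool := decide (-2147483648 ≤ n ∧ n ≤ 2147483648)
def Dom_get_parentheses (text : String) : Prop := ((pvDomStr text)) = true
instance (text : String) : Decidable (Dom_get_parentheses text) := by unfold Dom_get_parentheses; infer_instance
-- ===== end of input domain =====

-- B swaps each bracket pair by staged whole-string replace passes through a sentinel
-- instead of A's per-character if/elif loop; same return value on the domain.

-- ===== PORT A =====
-- A: index loop over range(len(text)); each index is in range, so pyGetD's default is unreachable.
def get_parentheses (text : String) : String :=
  String.ofList ((PySem.List.pyRange 0 (PySem.Str.len text) 1).foldl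
    (fun result i =>
      let c := PySem.List.pyGetD text.toList i ' '
      if c = '(' then result ++ ['[']
      else if c = '[' then result ++ ['(']
      else if c = ']' then result ++ [')']
      else if c = ')' then result ++ [']']
      else result ++ [c]) [])

-- ===== PORT B =====
-- Source B: six staged text.replace passes, swapping '(' <-> '[' and ')' <-> ']' via sentinels
def get_parentheses_alt (text : String) : String :=
  let t1 := PySem.Str.replace (PySem.Str.replace (PySem.Str.replace text "(" "\x00") "[" "(") "\x00" "["
  PySem.Str.replace (PySem.Str.replace (PySem.Str.replace t1 ")" "\x01") "]" ")") "\x01" "]"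

-- ===== PRECONDITION & SPEC =====
def Spec_get_parentheses (text : String) (out : String) : Prop := out = get_parentheses_alt text
instance (text : String) (out : String) : Decidable (Spec_get_parentheses text out) := by unfold Spec_get_parentheses; infer_instance

-- ===== CLAIM =====
def Claim_equal_get_parentheses : Prop := ∀ (text : String), Dom_get_parentheses text → Spec_get_parentheses text (get_parentheses text)

-- ===== LEMMAS AND PROOFS =====
-- A's swap, as a per-character function (used only inside the proof)
def pvSwap (c : Char) : Char :=
  if c = '(' then '['
  else if c = '[' then '('
  else if c = ']' then ')'
  else if c = ')' then ']'
  else c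

theorem pv_body_eq (result : List Char) (c : Char) :
    (if c = '(' then result ++ ['[']
     else if c = '[' then result ++ ['(']
     else if c = ']' then result ++ [')']
     else if c = ')' then result ++ [']']
     else result ++ [c]) = result ++ [pvSwap c] := by
  unfold pvSwap; split_ifs <;> rfl

theorem pvA_eq_map (text : String) :
    get_parentheses text = String.ofList (text.toList.map pvSwap) := by
  unfold get_parentheses
  rw [show PySem.Str.len text = ((text.toList.length : Nat) : Int) from by simp,
      PySem.List.foldl_pyRange_zero_pyGetD' text.toList ' '
        (fun result c =>
          if c = '(' then result ++ ['[']
          else if c = '[' then result ++ ['(']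
          else if c = ']' then result ++ [')']
          else if c = ')' then result ++ [']']
          else result ++ [c]) []]
  rw [show (fun (result : List Char) (c : Char) =>
          if c = '(' then result ++ ['[']
          else if c = '[' then result ++ ['(']
          else if c = ']' then result ++ [')']
          else if c = ')' then result ++ [']']
          else result ++ [c]) = fun result c => result ++ [pvSwap c] from
        funext fun r => funext fun c => pv_body_eq r c]
  rw [PySem.List.foldl_append_singleton_eq_map]
  simp

-- single-char replace is a map
theorem pv_go_single (a b : Char) :
    ∀ (l : List Char) (acc : List Char) (fuel : Nat), l.length ≤ fuel →
      PySem.Chars.replace.go [a] [b] fuel l acc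
        = acc.reverse ++ l.map (fun c => if c = a then b else c) := by
  intro l
  induction l with
  | nil =>
      intro acc fuel _
      cases fuel <;> simp [PySem.Chars.replace.go]
  | cons c t ih =>
      intro acc fuel hf
      cases fuel with
      | zero => simp at hf
      | succ n =>
        have hn : t.length ≤ n := by simpa using hf
        by_cases h : c = a
        · subst h
          simp [PySem.Chars.replace.go, List.isPrefixOf, ih _ _ hn]
        · simp [PySem.Chars.replace.go, List.isPrefixOf, h, ih _ _ hn]
          exact fun h' => absurd h'.symm h

theorem pv_replace_single (l : List Char) (a b : Char) :
    PySem.Chars.replace l [a] [b] = l.map (fun c => if c = a then b else c) := by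
  unfold PySem.Chars.replace
  simp [pv_go_single a b l [] l.length le_rfl]

def pvSub (a b c : Char) : Char := if c = a then b else c

theorem pv_lit_paren_l : ("(" : String).toList = ['('] := by decide
theorem pv_lit_paren_r : (")" : String).toList = [')'] := by decide
theorem pv_lit_brack_l : ("[" : String).toList = ['['] := by decide
theorem pv_lit_brack_r : ("]" : String).toList = [']'] := by decide
theorem pv_lit_s0 : ("\x00" : String).toList = ['\x00'] := by decide
theorem pv_lit_s1 : ("\x01" : String).toList = ['\x01'] := by decide

theorem pv_replace_single' (l : List Char) (a b : Char) :
    PySem.Chars.replace l [a] [b] = l.map (pvSub a b) :=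
  pv_replace_single l a b

-- the composed six substitutions agree with A's swap on every non-sentinel character
theorem pv_chain (c : Char) (h0 : c ≠ '\x00') (h1 : c ≠ '\x01') :
    pvSub '\x01' ']' (pvSub ']' ')' (pvSub ')' '\x01'
      (pvSub '\x00' '[' (pvSub '[' '(' (pvSub '(' '\x00' c))))) = pvSwap c := by
  by_cases hp : c = '(' ; · subst hp; decide
  by_cases hb : c = '[' ; · subst hb; decide
  by_cases hq : c = ')' ; · subst hq; decide
  by_cases hc : c = ']' ; · subst hc; decide
  simp [pvSub, pvSwap, hp, hb, hq, hc, h0, h1]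

set_option maxHeartbeats 1000000 in
theorem pvB_eq_map (text : String) (h : pvDomStr text = true) :
    get_parentheses_alt text = String.ofList (text.toList.map pvSwap) := by
  unfold get_parentheses_alt
  simp only [PySem.Str.replace, String.toList_ofList,
    pv_lit_paren_l, pv_lit_paren_r, pv_lit_brack_l, pv_lit_brack_r, pv_lit_s0, pv_lit_s1,
    pv_replace_single', List.map_map]
  refine congrArg String.ofList ?_
  apply List.map_congr_left
  intro c hc
  have hdom : pvDomChar c = true := by
    have := (List.all_eq_true.mp h) c hc
    simpa using this
  have h0 : c ≠ '\x00' := by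
    rintro rfl; simp [pvDomChar, Char.toNat] at hdom
  have h1 : c ≠ '\x01' := by
    rintro rfl; simp [pvDomChar, Char.toNat] at hdom
  simpa [Function.comp, pvSub] using pv_chain c h0 h1

-- ===== VERDICT =====
theorem get_parentheses_spec : Claim_equal_get_parentheses := by
  intro text hdom
  show get_parentheses text = get_parentheses_alt text
  rw [pvA_eq_map, pvB_eq_map text hdom]
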